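-- pv_equiv track=rewrite | github.com/Dambakk/gad | imageParser/imageParser.py | findEndCorners
-- ===== SOURCE A (Python) =====
-- def findEndCorners(corners, firstCorner, secondCorner):
--     firstValue = 0
--     secondValue = 0
--     number = 0
--     for i in corners:
--         if(i[1] == firstCorner[1]):
--             firstValue = number
--         if(i[1] == secondCorner[1]):
--             secondValue = number
--             break
--         number += 1
--
--     returnValue = firstValue,secondValue
--
--     return returnValue
-- ===== SOURCE B (Python) =====
-- def findEndCorners(corners, firstCorner, secondCorner):
--     # Pass 1: first index whose y matches secondCorner's y (the break point).
--     secondValue = 0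
--     limit = len(corners)
--     for j, c in enumerate(corners):
--         if c[1] == secondCorner[1]:
--             secondValue = j
--             limit = j + 1
--             break
--     # Pass 2: last index < limit whose y matches firstCorner's y.
--     firstValue = 0
--     for k in range(limit):
--         if corners[k][1] == firstCorner[1]:
--             firstValue = k
--     return (firstValue, secondValue)
-- ===== Notes on version B (the rewrite author's own statement) =====
-- stated objective: alternative
-- what changed: Replaces A's single fused loop carrying three mutable accumulators (with a break) by two independent passes: one enumerate-scan locating the break index for secondValue, then a bounded range(limit) scan taking the last y-match for firstValue.
import Mathlib
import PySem

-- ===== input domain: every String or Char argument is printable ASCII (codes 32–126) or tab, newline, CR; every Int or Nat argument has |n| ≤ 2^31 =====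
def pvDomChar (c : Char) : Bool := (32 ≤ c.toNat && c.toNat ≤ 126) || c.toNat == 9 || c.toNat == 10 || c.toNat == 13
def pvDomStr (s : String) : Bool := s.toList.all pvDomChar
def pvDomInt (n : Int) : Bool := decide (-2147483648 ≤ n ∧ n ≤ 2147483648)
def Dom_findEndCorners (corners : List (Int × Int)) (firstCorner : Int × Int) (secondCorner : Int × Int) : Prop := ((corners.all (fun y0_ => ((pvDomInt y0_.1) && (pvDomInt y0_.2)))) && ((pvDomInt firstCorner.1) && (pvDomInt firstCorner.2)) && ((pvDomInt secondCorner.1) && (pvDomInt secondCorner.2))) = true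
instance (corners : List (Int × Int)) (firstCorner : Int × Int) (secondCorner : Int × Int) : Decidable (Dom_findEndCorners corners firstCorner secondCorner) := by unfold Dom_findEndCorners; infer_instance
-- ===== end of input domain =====

-- B splits A's fused break-loop into two independent passes (alternative decomposition); same values everywhere.
-- ===== PORT A =====
-- A's for-loop: fv/n are firstValue/number; secondValue stays 0 unless the break fires (then it is n).
def pvA_loop (fcy scy : Int) : List (Int × Int) → Int → Int → Int × Int
  | [], fv, _n => (fv, 0)
  | i :: rest, fv, n =>
    let fv' := if i.2 = fcy then n else fv
    if i.2 = scy then (fv', n) else pvA_loop fcy scy rest fv' (n + 1)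

def findEndCorners (corners : List (Int × Int)) (firstCorner : Int × Int) (secondCorner : Int × Int) : Int × Int :=
  pvA_loop firstCorner.2 secondCorner.2 corners 0 0

-- ===== PORT B =====
-- pass 1 of Source B: first index j (counted from the running index) with c[1] == secondCorner[1]
def pvB_findFirst (scy : Int) : List (Int × Int) → Int → Option Int
  | [], _ => none
  | c :: rest, j => if c.2 = scy then some j else pvB_findFirst scy rest (j + 1)

-- pass 2 of Source B: the 'for k in range(limit)' scan, last index k < limit with corners[k][1] == firstCorner[1]
def pvB_scan (fcy : Int) : List (Int × Int) → Int → Int → Int → Int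
  | [], _, _, fv => fv
  | c :: rest, k, limit, fv =>
    if k < limit then pvB_scan fcy rest (k + 1) limit (if c.2 = fcy then k else fv)
    else fv

def findEndCorners_alt (corners : List (Int × Int)) (firstCorner : Int × Int) (secondCorner : Int × Int) : Int × Int :=
  match pvB_findFirst secondCorner.2 corners 0 with
  | some j => (pvB_scan firstCorner.2 corners 0 (j + 1) 0, j)
  | none => (pvB_scan firstCorner.2 corners 0 (corners.length : Int) 0, 0)

-- ===== PRECONDITION & SPEC =====
def Spec_findEndCorners (corners : List (Int × Int)) (firstCorner : Int × Int) (secondCorner : Int × Int) (out : Int × Int) : Prop := out = findEndCorners_alt corners firstCorner secondCorner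
instance (corners : List (Int × Int)) (firstCorner : Int × Int) (secondCorner : Int × Int) (out : Int × Int) : Decidable (Spec_findEndCorners corners firstCorner secondCorner out) := by unfold Spec_findEndCorners; infer_instance

-- ===== CLAIM (what is proved, stated in full; the proofs are below) =====
def Claim_equal_findEndCorners : Prop := ∀ (corners : List (Int × Int)) (firstCorner : Int × Int) (secondCorner : Int × Int), Dom_findEndCorners corners firstCorner secondCorner → Spec_findEndCorners corners firstCorner secondCorner (findEndCorners corners firstCorner secondCorner)

-- ===== LEMMAS AND PROOFS =====
lemma pvB_findFirst_ge (scy : Int) (xs : List (Int × Int)) (n j : Int)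
    (h : pvB_findFirst scy xs n = some j) : n ≤ j := by
  induction xs generalizing n with
  | nil => simp [pvB_findFirst] at h
  | cons c rest ih =>
    simp only [pvB_findFirst] at h
    split at h
    · cases h; omega
    · have := ih (n + 1) h; omega

lemma pvB_scan_stop (fcy : Int) (xs : List (Int × Int)) (k limit fv : Int)
    (h : ¬ k < limit) : pvB_scan fcy xs k limit fv = fv := by
  cases xs <;> simp [pvB_scan, h]

lemma pvKey (fcy scy : Int) (xs : List (Int × Int)) :
    ∀ (n fv : Int),
      pvA_loop fcy scy xs fv n =
        match pvB_findFirst scy xs n with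
        | some j => (pvB_scan fcy xs n (j + 1) fv, j)
        | none => (pvB_scan fcy xs n (n + (xs.length : Int)) fv, 0) := by
  induction xs with
  | nil => intro n fv; simp [pvA_loop, pvB_findFirst, pvB_scan]
  | cons c rest ih =>
    intro n fv
    simp only [pvA_loop, pvB_findFirst]
    by_cases hs : c.2 = scy
    · simp only [hs, if_true]
      have h1 : (n : Int) < n + 1 := by omega
      simp [pvB_scan, h1, pvB_scan_stop, hs]
    · simp only [hs, if_false]
      rw [ih (n + 1)]
      cases hf : pvB_findFirst scy rest (n + 1) with
      | some j =>
        have hj : n + 1 ≤ j := pvB_findFirst_ge scy rest (n + 1) j hf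
        have h1 : n < j + 1 := by omega
        simp [pvB_scan, h1]
      | none =>
        have h1 : n < n + (1 + (rest.length : Int)) := by
          have : (0 : Int) ≤ (rest.length : Int) := Int.natCast_nonneg _
          omega
        have h2 : n + 1 + (rest.length : Int) = n + (1 + (rest.length : Int)) := by ring
        simp [pvB_scan, List.length_cons, h2]
        ring_nf

-- ===== VERDICT (by name: the statement is the Claim_ definition above) =====
theorem findEndCorners_spec : Claim_equal_findEndCorners := by
  intro corners fc sc _
  unfold Spec_findEndCorners findEndCorners findEndCorners_alt
  rw [pvKey fc.2 sc.2 corners 0 0]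
  cases h : pvB_findFirst sc.2 corners 0 <;> simp
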